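-- pv_equiv track=rewrite | github.com/lx-0/pixel-realm | scripts/gen_tutorial_assets.py | make_glow_frame
-- ===== SOURCE A (Python) =====
-- _ = (0, 0, 0, 0)          # transparent
--
-- def blank(w, h, fill=None):
--     fill = fill or _
--     return [[fill]*w for __ in range(h)]
--
-- def set_px(grid, x, y, color):
--     if 0 <= y < len(grid) and 0 <= x < len(grid[0]):
--         grid[y][x] = color
--
-- def make_glow_frame(size, alpha_level):
--     """Create a glow border frame at given alpha."""
--     base_a = [60, 100, 140, 180][alpha_level]
--     inner_a = base_a // 2
--     grid = blank(size, size)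
--     # Outer glow border (2px thick)
--     for x in range(size):
--         set_px(grid, x, 0, (255, 224, 64, base_a))
--         set_px(grid, x, 1, (255, 224, 64, inner_a))
--         set_px(grid, x, size-1, (255, 224, 64, base_a))
--         set_px(grid, x, size-2, (255, 224, 64, inner_a))
--     for y in range(size):
--         set_px(grid, 0, y, (255, 224, 64, base_a))
--         set_px(grid, 1, y, (255, 224, 64, inner_a))
--         set_px(grid, size-1, y, (255, 224, 64, base_a))
--         set_px(grid, size-2, y, (255, 224, 64, inner_a))
--     # Corner emphasis
--     for dx, dy in [(0,0), (size-1,0), (0,size-1), (size-1,size-1)]: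
--         set_px(grid, dx, dy, (255, 248, 160, min(255, base_a + 40)))
--     return grid
-- ===== SOURCE B (Python) =====
-- def make_glow_frame(size, alpha_level):
--     """Create a glow border frame at given alpha (single closed-form pass)."""
--     base_a = [60, 100, 140, 180][alpha_level]
--     inner_a = base_a // 2
--     corner = (255, 248, 160, min(255, base_a + 40))
--     base = (255, 224, 64, base_a)
--     inner = (255, 224, 64, inner_a)
--
--     def px(x, y):
--         if (x == 0 or x == size - 1) and (y == 0 or y == size - 1):
--             return corner
--         if x == 0 or x == size - 1:
--             return base
--         if x == 1 or x == size - 2: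
--             return inner
--         if y == 0 or y == size - 1:
--             return base
--         if y == 1 or y == size - 2:
--             return inner
--         return (0, 0, 0, 0)
--
--     return [[px(x, y) for x in range(size)] for y in range(size)]
-- ===== Notes on version B (the rewrite author's own statement) =====
-- stated objective: alternative
-- what changed: Replaces the blank-grid-plus-three-rounds-of-border-mutations (set_px writes whose last write wins) by one closed-form per-pixel function evaluated in a single nested comprehension; write precedence becomes an explicit elif chain (corners, then columns, then rows).
import Mathlib
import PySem

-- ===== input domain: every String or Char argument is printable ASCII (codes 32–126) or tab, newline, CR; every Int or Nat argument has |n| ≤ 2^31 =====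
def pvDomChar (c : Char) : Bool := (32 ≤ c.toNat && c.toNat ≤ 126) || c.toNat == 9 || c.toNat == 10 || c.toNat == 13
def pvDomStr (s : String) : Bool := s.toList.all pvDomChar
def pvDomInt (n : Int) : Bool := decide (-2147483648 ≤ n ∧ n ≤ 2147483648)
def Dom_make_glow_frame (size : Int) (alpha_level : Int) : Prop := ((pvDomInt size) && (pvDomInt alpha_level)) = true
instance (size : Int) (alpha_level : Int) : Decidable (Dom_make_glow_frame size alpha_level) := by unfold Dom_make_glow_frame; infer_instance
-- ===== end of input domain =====

-- B replaces A's blank-grid-plus-border-mutations by one closed-form per-pixel pass (alternative decomposition, same cost).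


-- ===== PORT A =====
-- blank(w, h): [[fill]*w for __ in range(h)]
def pvBlank (w h : Int) (fill : List Int) : List (List (List Int)) :=
  (PySem.List.pyRange 0 h).map (fun _ => List.replicate w.toNat fill)

-- set_px(grid, x, y, color): bounds-guarded in-place write (here: a functional update)
def pvSetPx (g : List (List (List Int))) (x y : Int) (c : List Int) : List (List (List Int)) :=
  if 0 ≤ y ∧ y < (g.length : Int) ∧ 0 ≤ x ∧ x < ((g.headD []).length : Int) then
    g.set y.toNat ((g.getD y.toNat []).set x.toNat c)
  else g

def make_glow_frame (size : Int) (alpha_level : Int) : List (List (List Int)) :=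
  let base_a := (PySem.List.pyGet? [60, 100, 140, 180] alpha_level).getD 0  -- none = IndexError, excluded by Pre_
  let inner_a := PySem.Int.floordiv base_a 2
  let grid := pvBlank size size [0, 0, 0, 0]
  let grid := (PySem.List.pyRange 0 size).foldl (fun g x =>
      pvSetPx (pvSetPx (pvSetPx (pvSetPx g x 0 [255, 224, 64, base_a])
        x 1 [255, 224, 64, inner_a]) x (size-1) [255, 224, 64, base_a])
        x (size-2) [255, 224, 64, inner_a]) grid
  let grid := (PySem.List.pyRange 0 size).foldl (fun g y =>
      pvSetPx (pvSetPx (pvSetPx (pvSetPx g 0 y [255, 224, 64, base_a])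
        1 y [255, 224, 64, inner_a]) (size-1) y [255, 224, 64, base_a])
        (size-2) y [255, 224, 64, inner_a]) grid
  [((0:Int), (0:Int)), (size-1, 0), (0, size-1), (size-1, size-1)].foldl
    (fun g p => pvSetPx g p.1 p.2 [255, 248, 160, min 255 (base_a + 40)]) grid

-- ===== PORT B =====
-- px(x, y): the closed-form pixel value (corners, then columns, then rows)
def pvPx (size base_a inner_a : Int) (x y : Int) : List Int :=
  if (x = 0 ∨ x = size - 1) ∧ (y = 0 ∨ y = size - 1) then [255, 248, 160, min 255 (base_a + 40)]
  else if x = 0 ∨ x = size - 1 then [255, 224, 64, base_a]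
  else if x = 1 ∨ x = size - 2 then [255, 224, 64, inner_a]
  else if y = 0 ∨ y = size - 1 then [255, 224, 64, base_a]
  else if y = 1 ∨ y = size - 2 then [255, 224, 64, inner_a]
  else [0, 0, 0, 0]

def make_glow_frame_alt (size : Int) (alpha_level : Int) : List (List (List Int)) :=
  let base_a := (PySem.List.pyGet? [60, 100, 140, 180] alpha_level).getD 0  -- none = IndexError, excluded by Pre_
  let inner_a := PySem.Int.floordiv base_a 2
  (PySem.List.pyRange 0 size).map (fun y =>
    (PySem.List.pyRange 0 size).map (fun x => pvPx size base_a inner_a x y))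

-- ===== PRECONDITION & SPEC =====
-- Both programs raise IndexError iff alpha_level is outside the valid (Python, sign-aware) index range of the 4-element alpha table.
def Pre_make_glow_frame (size : Int) (alpha_level : Int) : Prop := -4 ≤ alpha_level ∧ alpha_level ≤ 3
instance (size : Int) (alpha_level : Int) : Decidable (Pre_make_glow_frame size alpha_level) := by unfold Pre_make_glow_frame; infer_instance
def pvWitness_make_glow_frame : Int × Int := (5, 1)

def Spec_make_glow_frame (size : Int) (alpha_level : Int) (out : List (List (List Int))) : Prop := out = make_glow_frame_alt size alpha_level
instance (size : Int) (alpha_level : Int) (out : List (List (List Int))) : Decidable (Spec_make_glow_frame size alpha_level out) := by unfold Spec_make_glow_frame; infer_instance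

-- ===== CLAIM (what is proved, stated in full; the proofs are below) =====
def Claim_equal_make_glow_frame : Prop := ∀ (size : Int) (alpha_level : Int), Dom_make_glow_frame size alpha_level → Pre_make_glow_frame size alpha_level → Spec_make_glow_frame size alpha_level (make_glow_frame size alpha_level)

-- ===== LEMMAS AND PROOFS =====

-- pixel accessor used throughout the proof
def pvGpx (g : List (List (List Int))) (j i : Nat) : List Int := (g.getD j []).getD i []

theorem pvSetPx_length (g : List (List (List Int))) (x y : Int) (c : List Int) :
    (pvSetPx g x y c).length = g.length := by
  unfold pvSetPx; split <;> simp

theorem pvSetPx_rows {n : Nat} (g : List (List (List Int))) (x y : Int) (c : List Int)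
    (hrows : ∀ r ∈ g, r.length = n) :
    ∀ r ∈ pvSetPx g x y c, r.length = n := by
  intro r hr
  unfold pvSetPx at hr
  split at hr
  · rcases List.mem_or_eq_of_mem_set hr with h | h
    · exact hrows r h
    · subst h
      rename_i hcond
      have hy : y.toNat < g.length := by omega
      have hmem : g.getD y.toNat [] ∈ g := by
        rw [List.getD_eq_getElem g [] hy]; exact List.getElem_mem hy
      rw [List.length_set]; exact hrows _ hmem
  · exact hrows r hr

theorem pvHead_len {n : Nat} (g : List (List (List Int))) (hg : g.length = n)
    (hrows : ∀ r ∈ g, r.length = n) (hn : 0 < n) : (g.headD []).length = n := by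
  cases g with
  | nil => simp at hg; omega
  | cons r t => exact hrows r (by simp)

theorem pvSetPx_gpx {n : Nat} (g : List (List (List Int))) (x y : Int) (c : List Int)
    (hg : g.length = n) (hrows : ∀ r ∈ g, r.length = n)
    (j i : Nat) (hj : j < n) (hi : i < n) :
    pvGpx (pvSetPx g x y c) j i = if y = (j : Int) ∧ x = (i : Int) then c else pvGpx g j i := by
  have hhead : (g.headD []).length = n := pvHead_len g hg hrows (by omega)
  have hjg : j < g.length := by omega
  unfold pvSetPx pvGpx
  split
  · rename_i hcond
    rw [hg] at hcond; rw [hhead] at hcond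
    have hyn : y.toNat < g.length := by omega
    have hrowlen : (g[y.toNat]?.getD []).length = n := by
      rw [List.getElem?_eq_getElem hyn]; exact hrows _ (List.getElem_mem hyn)
    by_cases hyj : y.toNat = j
    · have hyj' : y = (j : Int) := by omega
      by_cases hxi : x.toNat = i
      · have hxi' : x = (i : Int) := by omega
        have hli : i < g[j].length := by rw [hrows _ (List.getElem_mem hjg)]; exact hi
        simp [List.getD_eq_getElem?_getD, hyj', hxi', hjg, hli]
      · have hxi' : ¬ x = (i : Int) := by omega
        simp [List.getD_eq_getElem?_getD, hxi, hyj', hxi', hjg]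
    · have hyj' : ¬ (y = (j : Int) ∧ x = (i : Int)) := by omega
      simp [List.getD_eq_getElem?_getD, hyj, hyj']
  · rename_i hcond
    rw [hg, hhead] at hcond
    rw [if_neg (by omega)]

-- the value the row loop leaves at a pixel of column x = i, row y = j (last write wins)
def pvRowVal (size inner_a base_a : Int) (j : Nat) (old : List Int) : List Int :=
  if size - 2 = (j : Int) then [255, 224, 64, inner_a]
  else if size - 1 = (j : Int) then [255, 224, 64, base_a]
  else if 1 = (j : Int) then [255, 224, 64, inner_a]
  else if 0 = (j : Int) then [255, 224, 64, base_a]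
  else old

-- the value the column loop leaves at a pixel of column x = i (last write wins)
def pvColVal (size inner_a base_a : Int) (i : Nat) (old : List Int) : List Int :=
  if size - 2 = (i : Int) then [255, 224, 64, inner_a]
  else if size - 1 = (i : Int) then [255, 224, 64, base_a]
  else if 1 = (i : Int) then [255, 224, 64, inner_a]
  else if 0 = (i : Int) then [255, 224, 64, base_a]
  else old

theorem pvRowLoop {n : Nat} (size inner_a base_a : Int)
    (k : Nat) (hk : k ≤ n) (g : List (List (List Int)))
    (hg : g.length = n) (hrows : ∀ r ∈ g, r.length = n) :
    ((PySem.List.pyRange 0 (k : Int)).foldl (fun g x =>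
      pvSetPx (pvSetPx (pvSetPx (pvSetPx g x 0 [255, 224, 64, base_a])
        x 1 [255, 224, 64, inner_a]) x (size-1) [255, 224, 64, base_a])
        x (size-2) [255, 224, 64, inner_a]) g).length = n ∧
    (∀ r ∈ (PySem.List.pyRange 0 (k : Int)).foldl (fun g x =>
      pvSetPx (pvSetPx (pvSetPx (pvSetPx g x 0 [255, 224, 64, base_a])
        x 1 [255, 224, 64, inner_a]) x (size-1) [255, 224, 64, base_a])
        x (size-2) [255, 224, 64, inner_a]) g, r.length = n) ∧
    (∀ j i : Nat, j < n → i < n →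
      pvGpx ((PySem.List.pyRange 0 (k : Int)).foldl (fun g x =>
      pvSetPx (pvSetPx (pvSetPx (pvSetPx g x 0 [255, 224, 64, base_a])
        x 1 [255, 224, 64, inner_a]) x (size-1) [255, 224, 64, base_a])
        x (size-2) [255, 224, 64, inner_a]) g) j i =
        if i < k then pvRowVal size inner_a base_a j (pvGpx g j i) else pvGpx g j i) := by
  induction k generalizing g with
  | zero =>
    simp only [Nat.cast_zero]
    rw [PySem.List.pyRange_one_eq_nil (le_refl 0)]
    exact ⟨hg, hrows, fun j i hj hi => by simp⟩
  | succ k ih =>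
    obtain ⟨hlen, hrows', hgpx⟩ := ih (by omega) g hg hrows
    rw [show ((k+1 : Nat) : Int) = (k : Int) + 1 by push_cast; ring,
        PySem.List.pyRange_one_succ_right (by positivity), List.foldl_append]
    simp only [List.foldl_cons, List.foldl_nil]
    set gk := (PySem.List.pyRange 0 (k : Int)).foldl (fun g x =>
      pvSetPx (pvSetPx (pvSetPx (pvSetPx g x 0 [255, 224, 64, base_a])
        x 1 [255, 224, 64, inner_a]) x (size-1) [255, 224, 64, base_a])
        x (size-2) [255, 224, 64, inner_a]) g with hgk
    set s1 := pvSetPx gk (k : Int) 0 [255, 224, 64, base_a] with hs1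
    set s2 := pvSetPx s1 (k : Int) 1 [255, 224, 64, inner_a] with hs2
    set s3 := pvSetPx s2 (k : Int) (size-1) [255, 224, 64, base_a] with hs3
    have l1 := pvSetPx_length gk (k : Int) 0 [255, 224, 64, base_a]
    have r1 := pvSetPx_rows (n := n) gk (k : Int) 0 [255, 224, 64, base_a] hrows'
    have l2 := pvSetPx_length s1 (k : Int) 1 [255, 224, 64, inner_a]
    have r2 := pvSetPx_rows (n := n) s1 (k : Int) 1 [255, 224, 64, inner_a] r1
    have l3 := pvSetPx_length s2 (k : Int) (size-1) [255, 224, 64, base_a]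
    have r3 := pvSetPx_rows (n := n) s2 (k : Int) (size-1) [255, 224, 64, base_a] r2
    have l4 := pvSetPx_length s3 (k : Int) (size-2) [255, 224, 64, inner_a]
    have r4 := pvSetPx_rows (n := n) s3 (k : Int) (size-2) [255, 224, 64, inner_a] r3
    refine ⟨by rw [l4, l3, l2, l1]; exact hlen, r4, ?_⟩
    intro j i hj hi
    rw [pvSetPx_gpx _ _ _ _ (by rw [l3, l2, l1]; exact hlen) r3 j i hj hi,
        pvSetPx_gpx _ _ _ _ (by rw [l2, l1]; exact hlen) r2 j i hj hi,
        pvSetPx_gpx _ _ _ _ (by rw [l1]; exact hlen) r1 j i hj hi,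
        pvSetPx_gpx _ _ _ _ hlen hrows' j i hj hi,
        hgpx j i hj hi]
    by_cases hki : (k : Int) = (i : Int)
    · simp only [hki, and_true]
      rw [if_neg (by omega : ¬ i < k), if_pos (by omega : i < k + 1)]
      unfold pvRowVal
      rfl
    · rw [if_neg (fun h => hki h.2), if_neg (fun h => hki h.2),
          if_neg (fun h => hki h.2), if_neg (fun h => hki h.2)]
      by_cases hik : i < k
      · rw [if_pos hik, if_pos (by omega : i < k + 1)]
      · rw [if_neg hik, if_neg (by omega : ¬ i < k + 1)]

theorem pvColLoop {n : Nat} (size inner_a base_a : Int)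
    (k : Nat) (hk : k ≤ n) (g : List (List (List Int)))
    (hg : g.length = n) (hrows : ∀ r ∈ g, r.length = n) :
    ((PySem.List.pyRange 0 (k : Int)).foldl (fun g y =>
      pvSetPx (pvSetPx (pvSetPx (pvSetPx g 0 y [255, 224, 64, base_a])
        1 y [255, 224, 64, inner_a]) (size-1) y [255, 224, 64, base_a])
        (size-2) y [255, 224, 64, inner_a]) g).length = n ∧
    (∀ r ∈ (PySem.List.pyRange 0 (k : Int)).foldl (fun g y =>
      pvSetPx (pvSetPx (pvSetPx (pvSetPx g 0 y [255, 224, 64, base_a])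
        1 y [255, 224, 64, inner_a]) (size-1) y [255, 224, 64, base_a])
        (size-2) y [255, 224, 64, inner_a]) g, r.length = n) ∧
    (∀ j i : Nat, j < n → i < n →
      pvGpx ((PySem.List.pyRange 0 (k : Int)).foldl (fun g y =>
      pvSetPx (pvSetPx (pvSetPx (pvSetPx g 0 y [255, 224, 64, base_a])
        1 y [255, 224, 64, inner_a]) (size-1) y [255, 224, 64, base_a])
        (size-2) y [255, 224, 64, inner_a]) g) j i =
        if j < k then pvColVal size inner_a base_a i (pvGpx g j i) else pvGpx g j i) := by
  induction k generalizing g with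
  | zero =>
    simp only [Nat.cast_zero]
    rw [PySem.List.pyRange_one_eq_nil (le_refl 0)]
    exact ⟨hg, hrows, fun j i hj hi => by simp⟩
  | succ k ih =>
    obtain ⟨hlen, hrows', hgpx⟩ := ih (by omega) g hg hrows
    rw [show ((k+1 : Nat) : Int) = (k : Int) + 1 by push_cast; ring,
        PySem.List.pyRange_one_succ_right (by positivity), List.foldl_append]
    simp only [List.foldl_cons, List.foldl_nil]
    set gk := (PySem.List.pyRange 0 (k : Int)).foldl (fun g y =>
      pvSetPx (pvSetPx (pvSetPx (pvSetPx g 0 y [255, 224, 64, base_a])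
        1 y [255, 224, 64, inner_a]) (size-1) y [255, 224, 64, base_a])
        (size-2) y [255, 224, 64, inner_a]) g with hgk
    set s1 := pvSetPx gk 0 (k : Int) [255, 224, 64, base_a] with hs1
    set s2 := pvSetPx s1 1 (k : Int) [255, 224, 64, inner_a] with hs2
    set s3 := pvSetPx s2 (size-1) (k : Int) [255, 224, 64, base_a] with hs3
    have l1 := pvSetPx_length gk 0 (k : Int) [255, 224, 64, base_a]
    have r1 := pvSetPx_rows (n := n) gk 0 (k : Int) [255, 224, 64, base_a] hrows'
    have l2 := pvSetPx_length s1 1 (k : Int) [255, 224, 64, inner_a]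
    have r2 := pvSetPx_rows (n := n) s1 1 (k : Int) [255, 224, 64, inner_a] r1
    have l3 := pvSetPx_length s2 (size-1) (k : Int) [255, 224, 64, base_a]
    have r3 := pvSetPx_rows (n := n) s2 (size-1) (k : Int) [255, 224, 64, base_a] r2
    have l4 := pvSetPx_length s3 (size-2) (k : Int) [255, 224, 64, inner_a]
    have r4 := pvSetPx_rows (n := n) s3 (size-2) (k : Int) [255, 224, 64, inner_a] r3
    refine ⟨by rw [l4, l3, l2, l1]; exact hlen, r4, ?_⟩
    intro j i hj hi
    rw [pvSetPx_gpx _ _ _ _ (by rw [l3, l2, l1]; exact hlen) r3 j i hj hi,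
        pvSetPx_gpx _ _ _ _ (by rw [l2, l1]; exact hlen) r2 j i hj hi,
        pvSetPx_gpx _ _ _ _ (by rw [l1]; exact hlen) r1 j i hj hi,
        pvSetPx_gpx _ _ _ _ hlen hrows' j i hj hi,
        hgpx j i hj hi]
    by_cases hki : (k : Int) = (j : Int)
    · simp only [hki, true_and]
      rw [if_neg (by omega : ¬ j < k), if_pos (by omega : j < k + 1)]
      unfold pvColVal
      rfl
    · rw [if_neg (fun h => hki h.1), if_neg (fun h => hki h.1),
          if_neg (fun h => hki h.1), if_neg (fun h => hki h.1)]
      by_cases hik : j < k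
      · rw [if_pos hik, if_pos (by omega : j < k + 1)]
      · rw [if_neg hik, if_neg (by omega : ¬ j < k + 1)]

theorem pvPixelCase (N a b base_a inner_a : Int)
    (h1 : 0 ≤ a) (h2 : a < N) (h3 : 0 ≤ b) (h4 : b < N) :
    (if N - 1 = a ∧ N - 1 = b then [255, 248, 160, min 255 (base_a + 40)]
     else if N - 1 = a ∧ 0 = b then [255, 248, 160, min 255 (base_a + 40)]
     else if 0 = a ∧ N - 1 = b then [255, 248, 160, min 255 (base_a + 40)]
     else if 0 = a ∧ 0 = b then [255, 248, 160, min 255 (base_a + 40)]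
     else if N - 2 = b then [255, 224, 64, inner_a]
     else if N - 1 = b then [255, 224, 64, base_a]
     else if 1 = b then [255, 224, 64, inner_a]
     else if 0 = b then [255, 224, 64, base_a]
     else if N - 2 = a then [255, 224, 64, inner_a]
     else if N - 1 = a then [255, 224, 64, base_a]
     else if 1 = a then [255, 224, 64, inner_a]
     else if 0 = a then [255, 224, 64, base_a]
     else ([0, 0, 0, 0] : List Int)) =
    if (b = 0 ∨ b = N - 1) ∧ (a = 0 ∨ a = N - 1) then [255, 248, 160, min 255 (base_a + 40)]
    else if b = 0 ∨ b = N - 1 then [255, 224, 64, base_a]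
    else if b = 1 ∨ b = N - 2 then [255, 224, 64, inner_a]
    else if a = 0 ∨ a = N - 1 then [255, 224, 64, base_a]
    else if a = 1 ∨ a = N - 2 then [255, 224, 64, inner_a]
    else [0, 0, 0, 0] := by
  by_cases c1 : N - 1 = a ∧ N - 1 = b
  · rw [if_pos c1, if_pos (by omega : (b = 0 ∨ b = N - 1) ∧ (a = 0 ∨ a = N - 1))]
  · rw [if_neg c1]
    by_cases c2 : N - 1 = a ∧ 0 = b
    · rw [if_pos c2, if_pos (by omega : (b = 0 ∨ b = N - 1) ∧ (a = 0 ∨ a = N - 1))]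
    · rw [if_neg c2]
      by_cases c3 : 0 = a ∧ N - 1 = b
      · rw [if_pos c3, if_pos (by omega : (b = 0 ∨ b = N - 1) ∧ (a = 0 ∨ a = N - 1))]
      · rw [if_neg c3]
        by_cases c4 : 0 = a ∧ 0 = b
        · rw [if_pos c4, if_pos (by omega : (b = 0 ∨ b = N - 1) ∧ (a = 0 ∨ a = N - 1))]
        · rw [if_neg c4, if_neg (by omega : ¬((b = 0 ∨ b = N - 1) ∧ (a = 0 ∨ a = N - 1)))]
          by_cases c5 : N - 2 = b
          · rw [if_pos c5, if_neg (by omega : ¬(b = 0 ∨ b = N - 1)),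
                if_pos (by omega : b = 1 ∨ b = N - 2)]
          · rw [if_neg c5]
            by_cases c6 : N - 1 = b
            · rw [if_pos c6, if_pos (by omega : b = 0 ∨ b = N - 1)]
            · rw [if_neg c6]
              by_cases c7 : 1 = b
              · rw [if_pos c7, if_neg (by omega : ¬(b = 0 ∨ b = N - 1)),
                    if_pos (by omega : b = 1 ∨ b = N - 2)]
              · rw [if_neg c7]
                by_cases c8 : 0 = b
                · rw [if_pos c8, if_pos (by omega : b = 0 ∨ b = N - 1)]
                · rw [if_neg c8, if_neg (by omega : ¬(b = 0 ∨ b = N - 1)),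
                      if_neg (by omega : ¬(b = 1 ∨ b = N - 2))]
                  by_cases c9 : N - 2 = a
                  · rw [if_pos c9, if_neg (by omega : ¬(a = 0 ∨ a = N - 1)),
                        if_pos (by omega : a = 1 ∨ a = N - 2)]
                  · rw [if_neg c9]
                    by_cases c10 : N - 1 = a
                    · rw [if_pos c10, if_pos (by omega : a = 0 ∨ a = N - 1)]
                    · rw [if_neg c10]
                      by_cases c11 : 1 = a
                      · rw [if_pos c11, if_neg (by omega : ¬(a = 0 ∨ a = N - 1)),
                            if_pos (by omega : a = 1 ∨ a = N - 2)]
                      · rw [if_neg c11]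
                        by_cases c12 : 0 = a
                        · rw [if_pos c12, if_pos (by omega : a = 0 ∨ a = N - 1)]
                        · rw [if_neg c12, if_neg (by omega : ¬(a = 0 ∨ a = N - 1)),
                              if_neg (by omega : ¬(a = 1 ∨ a = N - 2))]


theorem pvGridEq {n : Nat} (g h : List (List (List Int)))
    (hgl : g.length = n) (hgr : ∀ r ∈ g, r.length = n)
    (hhl : h.length = n) (hhr : ∀ r ∈ h, r.length = n)
    (hpx : ∀ j i : Nat, j < n → i < n → pvGpx g j i = pvGpx h j i) : g = h := by
  apply List.ext_getElem (by omega)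
  intro j hj1 hj2
  have hrg : g[j].length = n := hgr _ (List.getElem_mem hj1)
  have hrh : h[j].length = n := hhr _ (List.getElem_mem hj2)
  apply List.ext_getElem (by omega)
  intro i hi1 hi2
  have h1 : pvGpx g j i = g[j][i] := by
    unfold pvGpx; rw [List.getD_eq_getElem _ _ hj1, List.getD_eq_getElem _ _ hi1]
  have h2 : pvGpx h j i = h[j][i] := by
    unfold pvGpx; rw [List.getD_eq_getElem _ _ hj2, List.getD_eq_getElem _ _ hi2]
  rw [← h1, ← h2]
  exact hpx j i (by omega) (by omega)

set_option maxHeartbeats 2000000 in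
theorem make_glow_frame_spec : Claim_equal_make_glow_frame := by
  intro size alpha_level hdom hpre
  unfold Spec_make_glow_frame make_glow_frame make_glow_frame_alt
  by_cases hneg : size ≤ 0
  · rw [PySem.List.pyRange_one_eq_nil hneg]
    simp [pvBlank, PySem.List.pyRange_one_eq_nil hneg, pvSetPx, List.set_nil]
  · rw [not_le] at hneg
    obtain ⟨n, rfl⟩ : ∃ n : Nat, size = (n : Int) :=
      ⟨size.toNat, (Int.toNat_of_nonneg (by omega)).symm⟩
    have hn : 0 < n := by exact_mod_cast hneg
    simp only [List.foldl_cons, List.foldl_nil]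
    set base_a : Int := (PySem.List.pyGet? [60, 100, 140, 180] alpha_level).getD 0 with hBa
    set inner_a : Int := PySem.Int.floordiv base_a 2 with hIa
    clear_value base_a inner_a
    -- facts about the blank grid
    have hb0 : (pvBlank (n : Int) (n : Int) [0, 0, 0, 0]).length = n ∧
        (∀ r ∈ pvBlank (n : Int) (n : Int) [0, 0, 0, 0], r.length = n) ∧
        (∀ j i : Nat, j < n → i < n → pvGpx (pvBlank (n : Int) (n : Int) [0, 0, 0, 0]) j i = [0, 0, 0, 0]) := by
      refine ⟨by simp [pvBlank, PySem.List.length_pyRange_one], ?_, ?_⟩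
      · intro r hr
        simp only [pvBlank, List.mem_map] at hr
        obtain ⟨_, _, rfl⟩ := hr
        simp
      · intro j i hj hi
        unfold pvGpx pvBlank
        simp only [List.getD_eq_getElem?_getD]
        rw [PySem.List.getElem?_map_pyRange_zero _ n j hj, Option.getD_some]
        simp [hi]
    obtain ⟨h1l, h1r, h1g⟩ := pvRowLoop (n := n) (n : Int) inner_a base_a n (le_refl n)
      (pvBlank (n : Int) (n : Int) [0, 0, 0, 0]) hb0.1 hb0.2.1
    obtain ⟨h2l, h2r, h2g⟩ := pvColLoop (n := n) (n : Int) inner_a base_a n (le_refl n)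
      _ h1l h1r
    -- the four corner writes
    set g2 := (PySem.List.pyRange 0 (n : Int)).foldl (fun g y =>
      pvSetPx (pvSetPx (pvSetPx (pvSetPx g 0 y [255, 224, 64, base_a])
        1 y [255, 224, 64, inner_a]) ((n : Int)-1) y [255, 224, 64, base_a])
        ((n : Int)-2) y [255, 224, 64, inner_a])
      ((PySem.List.pyRange 0 (n : Int)).foldl (fun g x =>
      pvSetPx (pvSetPx (pvSetPx (pvSetPx g x 0 [255, 224, 64, base_a])
        x 1 [255, 224, 64, inner_a]) x ((n : Int)-1) [255, 224, 64, base_a])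
        x ((n : Int)-2) [255, 224, 64, inner_a])
      (pvBlank (n : Int) (n : Int) [0, 0, 0, 0])) with hg2
    set C : List Int := [255, 248, 160, min 255 (base_a + 40)] with hC
    have c1l := pvSetPx_length g2 0 0 C
    have c1r := pvSetPx_rows (n := n) g2 0 0 C h2r
    set c1 := pvSetPx g2 0 0 C with hc1
    have c2l := pvSetPx_length c1 ((n : Int)-1) 0 C
    have c2r := pvSetPx_rows (n := n) c1 ((n : Int)-1) 0 C c1r
    set c2 := pvSetPx c1 ((n : Int)-1) 0 C with hc2
    have c3l := pvSetPx_length c2 0 ((n : Int)-1) C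
    have c3r := pvSetPx_rows (n := n) c2 0 ((n : Int)-1) C c2r
    set c3 := pvSetPx c2 0 ((n : Int)-1) C with hc3
    have c4l := pvSetPx_length c3 ((n : Int)-1) ((n : Int)-1) C
    have c4r := pvSetPx_rows (n := n) c3 ((n : Int)-1) ((n : Int)-1) C c3r
    apply pvGridEq (n := n) _ _ (by rw [c4l, c3l, c2l, c1l]; exact h2l) c4r
    · simp [PySem.List.length_pyRange_one]
    · intro r hr
      simp only [List.mem_map] at hr
      obtain ⟨_, _, rfl⟩ := hr
      simp [PySem.List.length_pyRange_one]
    · intro j i hj hi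
      rw [pvSetPx_gpx _ _ _ _ (by rw [c3l, c2l, c1l]; exact h2l) c3r j i hj hi,
          pvSetPx_gpx _ _ _ _ (by rw [c2l, c1l]; exact h2l) c2r j i hj hi,
          pvSetPx_gpx _ _ _ _ (by rw [c1l]; exact h2l) c1r j i hj hi,
          pvSetPx_gpx _ _ _ _ h2l h2r j i hj hi,
          h2g j i hj hi, if_pos hj, h1g j i hj hi, if_pos hi, hb0.2.2 j i hj hi]
      have hR : pvGpx ((PySem.List.pyRange 0 (n : Int)).map (fun y =>
          (PySem.List.pyRange 0 (n : Int)).map (fun x => pvPx (n : Int) base_a inner_a x y))) j i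
          = pvPx (n : Int) base_a inner_a (i : Int) (j : Int) := by
        unfold pvGpx
        simp only [List.getD_eq_getElem?_getD]
        rw [PySem.List.getElem?_map_pyRange_zero _ n j hj, Option.getD_some,
            PySem.List.getElem?_map_pyRange_zero _ n i hi, Option.getD_some]
      rw [hR, hC]
      unfold pvPx pvColVal pvRowVal
      exact pvPixelCase (n : Int) (j : Int) (i : Int) base_a inner_a
        (Int.natCast_nonneg j) (by exact_mod_cast hj) (Int.natCast_nonneg i) (by exact_mod_cast hi)
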